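-- pv_equiv track=rewrite | github.com/MrBrantCode/unitest_baseline | mut_generate/mist_train_cf/cf_58825/solution.py | first_non_space_char
-- ===== SOURCE A (Python) =====
-- def first_non_space_char(s):
--     for i, c in enumerate(s):
--         if not c.isspace():
--             if c.isdigit():
--                 return i, "Digit"
--             elif c.isalpha():
--                 return i, "Alphabet"
--             else:
--                 return -1, -1
--     return -1, -1
-- ===== SOURCE B (Python) =====
-- def first_non_space_char(s):
--     stripped = s.lstrip()
--     if not stripped:
--         return -1, -1
--     i = len(s) - len(stripped)
--     c = stripped[0]
--     if c.isdigit():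
--         return i, "Digit"
--     if c.isalpha():
--         return i, "Alphabet"
--     return -1, -1
-- ===== Notes on version B (the rewrite author's own statement) =====
-- stated objective: idiomatic
-- what changed: Replaces the fused enumerate-and-classify loop by a library lstrip scan: the first non-space index is recovered as len(s)-len(stripped) and a single character is classified once.
-- outside the precondition, e.g. on first_non_space_char('!'): A returns (-1, -1), B returns (-1, -1); on first_non_space_char('   '): A returns (-1, -1), B returns (-1, -1)
import Mathlib
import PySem

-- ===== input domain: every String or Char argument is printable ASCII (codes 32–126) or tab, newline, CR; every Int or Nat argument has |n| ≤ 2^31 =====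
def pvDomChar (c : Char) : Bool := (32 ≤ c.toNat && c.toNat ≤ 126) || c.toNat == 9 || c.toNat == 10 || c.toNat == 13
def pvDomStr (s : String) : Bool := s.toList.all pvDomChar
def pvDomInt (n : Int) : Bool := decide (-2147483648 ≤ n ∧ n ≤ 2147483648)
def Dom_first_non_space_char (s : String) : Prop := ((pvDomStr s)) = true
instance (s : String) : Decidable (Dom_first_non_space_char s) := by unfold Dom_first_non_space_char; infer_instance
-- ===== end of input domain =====

-- B replaces A's fused skip-and-classify loop by a library lstrip plus a length
-- subtraction for the index and a single-character classification (idiomatic).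


-- ===== PORT A =====
-- loop of A: enumerate(s); index carried as Int; outside Pre_ Python returns the
-- untypeable (-1, -1), the port returns the placeholder (-1, "-1") there.
def fnsGoA : List Char → Int → Int × String
  | [], _ => (-1, "-1")
  | c :: t, i =>
    if PySem.Chars.isspace c = false then
      if PySem.Chars.isdigit c = true then (i, "Digit")
      else if PySem.Chars.isalpha c = true then (i, "Alphabet")
      else (-1, "-1")
    else fnsGoA t (i + 1)

def first_non_space_char (s : String) : Int × String := fnsGoA s.toList 0

-- ===== PORT B =====
def first_non_space_char_alt (s : String) : Int × String :=
  match PySem.Chars.lstrip s.toList with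
  | [] => (-1, "-1")
  | c :: rest =>
    let i : Int := (s.toList.length : Int) - ((rest.length : Int) + 1)
    if PySem.Chars.isdigit c = true then (i, "Digit")
    else if PySem.Chars.isalpha c = true then (i, "Alphabet")
    else (-1, "-1")

-- ===== PRECONDITION & SPEC =====
-- Pre_ excludes exactly the inputs (all-space/empty strings and strings whose first
-- non-space character is neither a digit nor a letter) on which Python A returns
-- (-1, -1): an int where the declared String component is expected, not a value of
-- the return type Int × String.
def Pre_first_non_space_char (s : String) : Prop :=
  PySem.Chars.lstrip s.toList ≠ [] ∧
  PySem.Chars.isalnum ((PySem.Chars.lstrip s.toList).headD ' ') = true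
instance (s : String) : Decidable (Pre_first_non_space_char s) := by
  unfold Pre_first_non_space_char; infer_instance

def pvWitness_first_non_space_char : String := "  a7"

def Spec_first_non_space_char (s : String) (out : Int × String) : Prop := out = first_non_space_char_alt s
instance (s : String) (out : Int × String) : Decidable (Spec_first_non_space_char s out) := by unfold Spec_first_non_space_char; infer_instance

-- ===== CLAIM (what is proved, stated in full; the proofs are below) =====
def Claim_equal_first_non_space_char : Prop := ∀ (s : String), Dom_first_non_space_char s → Pre_first_non_space_char s → Spec_first_non_space_char s (first_non_space_char s)

-- ===== LEMMAS AND PROOFS =====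
-- A's loop computes the dropWhile-isspace decomposition that B reads off lstrip.
theorem fnsGoA_eq (l : List Char) (i : Int) :
    fnsGoA l i =
      match l.dropWhile PySem.Chars.isspace with
      | [] => (-1, "-1")
      | c :: rest =>
        if PySem.Chars.isdigit c = true then (i + ((l.length : Int) - ((rest.length : Int) + 1)), "Digit")
        else if PySem.Chars.isalpha c = true then (i + ((l.length : Int) - ((rest.length : Int) + 1)), "Alphabet")
        else (-1, "-1") := by
  induction l generalizing i with
  | nil => simp [fnsGoA]
  | cons c t ih =>
    by_cases hsp : PySem.Chars.isspace c = true
    · have h1 : fnsGoA (c :: t) i = fnsGoA t (i + 1) := by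
        simp [fnsGoA, hsp]
      rw [h1, ih, List.dropWhile_cons_of_pos hsp]
      cases hd : t.dropWhile PySem.Chars.isspace with
      | nil => simp
      | cons c' rest =>
        simp only [List.length_cons]
        split_ifs <;> simp <;> push_cast <;> ring
    · have hsp' : PySem.Chars.isspace c = false := by
        cases h : PySem.Chars.isspace c with
        | false => rfl
        | true => exact absurd h hsp
      rw [List.dropWhile_cons_of_neg (by simp [hsp'])]
      simp only [fnsGoA, hsp']
      simp only [List.length_cons]
      split_ifs <;> simp <;> push_cast <;> ring

-- ===== VERDICT (by name: the statement is the Claim_ definition above) =====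
theorem first_non_space_char_spec : Claim_equal_first_non_space_char := by
  intro s _ _
  unfold Spec_first_non_space_char first_non_space_char first_non_space_char_alt
  rw [fnsGoA_eq]
  unfold PySem.Chars.lstrip
  cases hd : s.toList.dropWhile PySem.Chars.isspace with
  | nil => simp
  | cons c rest =>
    dsimp only
    split_ifs <;> simp
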